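-- pv_equiv track=rewrite | github.com/wjngit/learn_something | learn/10-1/013.py | knapsack13
-- ===== SOURCE A (Python) =====
-- def knapsack13(weight: list, n: int, w: int):
--     # dp二维数组（2^23-1表示初始化值，要不同于0与1，每个阶段对应最小物品个数）
--     dp = [[2 ** 23 - 1] * (w + 1) for _ in range(n)]
--     # 初始化第一行
--     dp[0][0] = 0
--     if weight[0] <= w:
--         dp[0][weight[0]] = 1
--     for i in range(1, n):
--         for j in range(w + 1):
--             if j - weight[i] < 0:
--                 dp[i][j] = dp[i - 1][j]
--             else:
--                 dp[i][j] = min(dp[i - 1][j], dp[i - 1][j - weight[i]] + 1)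
--     # 背包不能装满
--     if dp[n - 1][w] == 2 ** 23 - 1:
--         return -1
--     return dp[n - 1][w]
-- ===== SOURCE B (Python) =====
-- def knapsack13(weight: list, n: int, w: int):
--     # Sparse DP: take the first table row, keep only its reachable entries in a
--     # dict sum -> min item count, and extend that dict item by item; each pass
--     # visits only the sums reachable so far instead of all capacities 0..w.
--     INF = 2 ** 23 - 1
--     row = [INF] * (w + 1)
--     row[0] = 0
--     if weight[0] <= w:
--         row[weight[0]] = 1
--     best = {}
--     for j in range(w + 1):
--         if row[j] < INF:
--             best[j] = row[j]
--     for i in range(1, n):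
--         wi = weight[i]
--         for s, c in list(best.items()):
--             t = s + wi
--             if t <= w and c + 1 < best.get(t, INF):
--                 best[t] = c + 1
--     return best.get(w, -1)
-- ===== Notes on version B (the rewrite author's own statement) =====
-- stated objective: alternative
-- what changed: Replaces A's dense n x (w+1) DP table with a dict mapping each reachable sum to its minimum item count, seeded from the first table row and extended item by item over the reachable sums only (inner loop over dict items instead of all capacities).
import Mathlib
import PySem

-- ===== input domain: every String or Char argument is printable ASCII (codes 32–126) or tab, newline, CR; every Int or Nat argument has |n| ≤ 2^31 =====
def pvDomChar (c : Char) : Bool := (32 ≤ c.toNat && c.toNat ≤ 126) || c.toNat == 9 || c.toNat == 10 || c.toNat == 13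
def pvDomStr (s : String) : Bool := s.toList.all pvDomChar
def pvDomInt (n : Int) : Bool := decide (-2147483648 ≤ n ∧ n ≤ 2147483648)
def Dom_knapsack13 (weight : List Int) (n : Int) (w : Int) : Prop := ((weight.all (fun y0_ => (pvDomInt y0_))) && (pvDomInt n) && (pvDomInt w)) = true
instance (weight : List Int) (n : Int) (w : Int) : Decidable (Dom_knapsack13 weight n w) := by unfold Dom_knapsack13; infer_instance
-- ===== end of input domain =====

-- B replaces A's dense n×(w+1) table with a dict mapping each reachable sum to its
-- minimum item count, seeded from the table's first row and extended item by item
-- over the reachable sums only (alternative data structure; not claimed faster).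

-- ===== PORT A =====
-- dp[i][j] read/write for the 2-D Python list, via PySem's total forms of
-- xs[i] (exact for in-range indices, which Pre_ guarantees).
def dpGet (dp : List (List Int)) (i j : Int) : Int :=
  PySem.List.pyGetD (PySem.List.pyGetD dp i []) j 0

def dpSet (dp : List (List Int)) (i j : Int) (v : Int) : List (List Int) :=
  PySem.List.pySetD dp i (PySem.List.pySetD (PySem.List.pyGetD dp i []) j v)

-- the body of A's inner 'for j' loop, named so the proofs can speak about it
def innerStep (weight : List Int) (i : Int) (dp : List (List Int)) (j : Int) : List (List Int) :=
  if j - PySem.List.pyGetD weight i 0 < 0 then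
    dpSet dp i j (dpGet dp (i - 1) j)
  else
    dpSet dp i j (min (dpGet dp (i - 1) j) (dpGet dp (i - 1) (j - PySem.List.pyGetD weight i 0) + 1))

def knapsack13 (weight : List Int) (n : Int) (w : Int) : Int :=
  let dp0 := (PySem.List.pyRange 0 n 1).map (fun _ => List.replicate (w + 1).toNat 8388607)
  let dp1 := dpSet dp0 0 0 0
  let dp2 := if PySem.List.pyGetD weight 0 0 ≤ w then dpSet dp1 0 (PySem.List.pyGetD weight 0 0) 1 else dp1
  let dpF := (PySem.List.pyRange 1 n 1).foldl (fun dp i =>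
    (PySem.List.pyRange 0 (w + 1) 1).foldl (innerStep weight i) dp) dp2
  if dpGet dpF (n - 1) w = 8388607 then -1 else dpGet dpF (n - 1) w

-- ===== PORT B =====
-- the body of B's inner 'for s, c' loop, named so the proofs can speak about it
def passStep (w wi : Int) (e : PySem.Dict Int Int) (sc : Int × Int) : PySem.Dict Int Int :=
  if sc.1 + wi ≤ w ∧ sc.2 + 1 < PySem.Dict.getD e (sc.1 + wi) 8388607 then
    PySem.Dict.insert e (sc.1 + wi) (sc.2 + 1)
  else e

def knapsack13_alt (weight : List Int) (n : Int) (w : Int) : Int :=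
  let row1 := PySem.List.pySetD (List.replicate (w + 1).toNat (8388607 : Int)) 0 0
  let row := if PySem.List.pyGetD weight 0 0 ≤ w then
      PySem.List.pySetD row1 (PySem.List.pyGetD weight 0 0) 1
    else row1
  let best0 := (PySem.List.pyRange 0 (w + 1) 1).foldl
    (fun d j => if PySem.List.pyGetD row j 0 < 8388607 then d.insert j (PySem.List.pyGetD row j 0) else d)
    PySem.Dict.empty
  let bestF := (PySem.List.pyRange 1 n 1).foldl (fun d i =>
    (PySem.Dict.items d).foldl (passStep w (PySem.List.pyGetD weight i 0)) d) best0
  PySem.Dict.getD bestF w (-1)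

-- ===== PRECONDITION & SPEC =====
-- Pre_ is exactly the set of inputs on which the Python A returns normally:
-- 1 ≤ n ≤ len(weight), capacity w ≥ 0, the used weights at indices 1..n-1 are ≥ 0
-- (a negative one always sends dp[i-1][j-weight[i]] past the row end), and if
-- weight[0] ≤ w then weight[0] ≥ -(w+1) (else dp[0][weight[0]] is out of range).
def Pre_knapsack13 (weight : List Int) (n : Int) (w : Int) : Prop :=
  1 ≤ n ∧ n ≤ weight.length ∧ 0 ≤ w ∧
  (∀ x ∈ (weight.take n.toNat).drop 1, 0 ≤ x) ∧
  (PySem.List.pyGetD weight 0 0 ≤ w → -(w + 1) ≤ PySem.List.pyGetD weight 0 0)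
instance (weight : List Int) (n : Int) (w : Int) : Decidable (Pre_knapsack13 weight n w) := by
  unfold Pre_knapsack13; infer_instance

def pvWitness_knapsack13 : List Int × Int × Int := ([1, 2, 3], 3, 4)

def Spec_knapsack13 (weight : List Int) (n : Int) (w : Int) (out : Int) : Prop := out = knapsack13_alt weight n w
instance (weight : List Int) (n : Int) (w : Int) (out : Int) : Decidable (Spec_knapsack13 weight n w out) := by unfold Spec_knapsack13; infer_instance

-- ===== CLAIM (what is proved, stated in full; the proofs are below) =====
def Claim_equal_knapsack13 : Prop := ∀ (weight : List Int) (n : Int) (w : Int), Dom_knapsack13 weight n w → Pre_knapsack13 weight n w → Spec_knapsack13 weight n w (knapsack13 weight n w)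

-- ===== LEMMAS AND PROOFS =====

-- the initial row both programs build (dp[0] in A, row in B)
def row0 (weight : List Int) (w : Int) : List Int :=
  if PySem.List.pyGetD weight 0 0 ≤ w then
    PySem.List.pySetD (PySem.List.pySetD (List.replicate (w + 1).toNat (8388607 : Int)) 0 0)
      (PySem.List.pyGetD weight 0 0) 1
  else PySem.List.pySetD (List.replicate (w + 1).toNat (8388607 : Int)) 0 0

-- the shared recurrence: gRec i j = A's dp[i][j] for 0 ≤ j ≤ w
def gRec (weight : List Int) (w : Int) : Nat → Int → Int
  | 0, j => (row0 weight w).getD j.toNat 0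
  | i' + 1, j =>
    if j - PySem.List.pyGetD weight ((i' : Int) + 1) 0 < 0 then gRec weight w i' j
    else min (gRec weight w i' j)
      (gRec weight w i' (j - PySem.List.pyGetD weight ((i' : Int) + 1) 0) + 1)

lemma pyGetD_nonneg_eq {α : Type} [Inhabited α] (xs : List α) (i : Int) (hi : 0 ≤ i) (d : α) :
    PySem.List.pyGetD xs i d = xs.getD i.toNat d := by
  have h : i = ((i.toNat : Nat) : Int) := by omega
  nth_rewrite 1 [h]
  rw [PySem.List.pyGetD_natCast]

lemma getD_set_self {α : Type} (xs : List α) (m : Nat) (v d : α) (h : m < xs.length) :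
    (xs.set m v).getD m d = v := by
  simp [List.getD_eq_getElem?_getD, h]

lemma getD_set_ne {α : Type} (xs : List α) (m k : Nat) (v d : α) (h : m ≠ k) :
    (xs.set m v).getD k d = xs.getD k d := by
  simp [List.getD_eq_getElem?_getD, h]

lemma length_row0 (weight : List Int) (w : Int) : (row0 weight w).length = (w + 1).toNat := by
  unfold row0
  split_ifs <;> simp [PySem.List.length_pySetD]

lemma wt_nonneg (weight : List Int) (n i : Int)
    (hwts : ∀ x ∈ (weight.take n.toNat).drop 1, 0 ≤ x) (hnl : n ≤ weight.length)
    (h0 : 1 ≤ i) (h1 : i < n) : 0 ≤ PySem.List.pyGetD weight i 0 := by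
  rw [pyGetD_nonneg_eq _ _ (by omega)]
  have hlt : i.toNat < weight.length := by omega
  rw [List.getD_eq_getElem?_getD, List.getElem?_eq_getElem hlt]
  simp only [Option.getD_some]
  apply hwts
  refine List.mem_iff_getElem.mpr ⟨i.toNat - 1, by simp [List.length_take]; omega, ?_⟩
  rw [List.getElem_drop, List.getElem_take]
  congr 1
  omega

-- ---- A side ----
-- A's dp[i][j] = v as a pure set, when the indices are nonnegative
lemma dpSet_eq (dp : List (List Int)) (i j : Int) (v : Int) (hi : 0 ≤ i) (hj : 0 ≤ j) :
    dpSet dp i j v = dp.set i.toNat ((dp.getD i.toNat []).set j.toNat v) := by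
  unfold dpSet
  rw [pyGetD_nonneg_eq _ _ hi, PySem.List.pySetD_of_nonneg (h := hj), PySem.List.pySetD_of_nonneg (h := hi)]

lemma dpGet_eq (dp : List (List Int)) (i j : Int) (hi : 0 ≤ i) (hj : 0 ≤ j) :
    dpGet dp i j = (dp.getD i.toNat []).getD j.toNat 0 := by
  unfold dpGet
  rw [pyGetD_nonneg_eq _ _ hi, pyGetD_nonneg_eq _ _ hj]

-- effect of one inner step at column j of row i (1 ≤ i)
lemma innerStep_effect (weight : List Int) (w i j : Int) (dp : List (List Int))
    (hi : 1 ≤ i) (hj : 0 ≤ j) (hjw : j ≤ w)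
    (hwi : 0 ≤ PySem.List.pyGetD weight i 0)
    (hprev : ∀ t : Nat, t < (w + 1).toNat → (dp.getD (i - 1).toNat []).getD t 0 = gRec weight w (i - 1).toNat t) :
    innerStep weight i dp j = dp.set i.toNat ((dp.getD i.toNat []).set j.toNat (gRec weight w i.toNat j)) := by
  obtain ⟨i', hi'⟩ : ∃ i', i.toNat = i' + 1 := ⟨i.toNat - 1, by omega⟩
  have hic : ((i' : Int) + 1) = i := by omega
  have hi1 : (i - 1).toNat = i' := by omega
  have hgr : gRec weight w i.toNat j =
      if j - PySem.List.pyGetD weight i 0 < 0 then gRec weight w (i - 1).toNat j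
      else min (gRec weight w (i - 1).toNat j)
        (gRec weight w (i - 1).toNat (j - PySem.List.pyGetD weight i 0) + 1) := by
    rw [hi', gRec, hic, hi1]
  have hr1 : dpGet dp (i - 1) j = gRec weight w (i - 1).toNat j := by
    rw [dpGet_eq _ _ _ (by omega) hj]
    have := hprev j.toNat (by omega)
    rwa [show ((j.toNat : Nat) : Int) = j by omega] at this
  unfold innerStep
  split_ifs with hcond
  · rw [dpSet_eq _ _ _ _ (by omega) hj, hr1, hgr, if_pos hcond]
  · have hr2 : dpGet dp (i - 1) (j - PySem.List.pyGetD weight i 0)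
        = gRec weight w (i - 1).toNat (j - PySem.List.pyGetD weight i 0) := by
      rw [dpGet_eq _ _ _ (by omega) (by omega)]
      have := hprev (j - PySem.List.pyGetD weight i 0).toNat (by omega)
      rwa [show (((j - PySem.List.pyGetD weight i 0).toNat : Nat) : Int)
        = j - PySem.List.pyGetD weight i 0 by omega] at this
    rw [dpSet_eq _ _ _ _ (by omega) hj, hr1, hr2, hgr, if_neg hcond]

-- the inner fold fills row i with gRec values and touches no other row
lemma inner_fold (weight : List Int) (n w i : Int) (dp : List (List Int))
    (hi : 1 ≤ i) (hin : i < n) (hw : 0 ≤ w)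
    (hwi : 0 ≤ PySem.List.pyGetD weight i 0)
    (hlen : dp.length = n.toNat)
    (hrowI : (dp.getD i.toNat []).length = (w + 1).toNat)
    (hprev : ∀ t : Nat, t < (w + 1).toNat → (dp.getD (i - 1).toNat []).getD t 0 = gRec weight w (i - 1).toNat t) :
    ∀ c : Nat, (c : Int) ≤ w + 1 →
      (∀ k : Nat, k ≠ i.toNat →
        (((PySem.List.pyRange 0 c 1).foldl (innerStep weight i) dp).getD k []) = dp.getD k []) ∧
      ((PySem.List.pyRange 0 c 1).foldl (innerStep weight i) dp).length = n.toNat ∧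
      (((PySem.List.pyRange 0 c 1).foldl (innerStep weight i) dp).getD i.toNat []).length = (w + 1).toNat ∧
      (∀ t : Nat, t < c →
        (((PySem.List.pyRange 0 c 1).foldl (innerStep weight i) dp).getD i.toNat []).getD t 0 = gRec weight w i.toNat t) := by
  intro c
  induction c with
  | zero =>
    intro _
    rw [show ((0 : Nat) : Int) = (0 : Int) by norm_num, PySem.List.pyRange_one_eq_nil (by omega)]
    exact ⟨fun _ _ => rfl, hlen, hrowI, fun t ht => absurd ht (by omega)⟩
  | succ c ihc =>
    intro hc1
    have hc1' : (c : Int) ≤ w := by push_cast at hc1; omega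
    obtain ⟨hother, hlen', hrowlen', hfill⟩ := ihc (by omega)
    have hsplit : PySem.List.pyRange 0 ((c + 1 : Nat) : Int) 1
        = PySem.List.pyRange 0 (c : Int) 1 ++ [(c : Int)] := by
      push_cast
      exact PySem.List.pyRange_one_succ_right (by omega)
    have hprev' : ∀ t : Nat, t < (w + 1).toNat →
        ((((PySem.List.pyRange 0 (c : Int) 1).foldl (innerStep weight i) dp)).getD (i - 1).toNat []).getD t 0
          = gRec weight w (i - 1).toNat t := by
      intro t ht
      rw [hother (i - 1).toNat (by omega)]
      exact hprev t ht
    have heff := innerStep_effect weight w i (c : Int)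
        ((PySem.List.pyRange 0 (c : Int) 1).foldl (innerStep weight i) dp)
        hi (by omega) hc1' hwi hprev'
    rw [hsplit, List.foldl_append, List.foldl_cons, List.foldl_nil]
    set dpc := (PySem.List.pyRange 0 (c : Int) 1).foldl (innerStep weight i) dp with hdpc
    have hiN : i.toNat < dpc.length := by rw [hlen']; omega
    have hcN : ((c : Int)).toNat = c := by omega
    rw [hcN] at heff
    rw [heff]
    refine ⟨?_, ?_, ?_, ?_⟩
    · intro k hk
      rw [getD_set_ne _ _ _ _ _ (fun h => hk h.symm)]
      exact hother k hk
    · simpa using hlen'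
    · rw [getD_set_self _ _ _ _ hiN]
      simpa using hrowlen'
    · intro t ht
      rw [getD_set_self _ _ _ _ hiN]
      by_cases hts : t = c
      · subst hts
        rw [getD_set_self _ _ _ _ (by rw [hrowlen']; omega)]
      · rw [getD_set_ne _ _ _ _ _ (fun h => hts h.symm)]
        exact hfill t (by omega)

-- invariant for the outer fold: after rows 1..m, rows 0..m hold gRec
lemma outer_fold (weight : List Int) (n w : Int) (dp : List (List Int))
    (hn : 1 ≤ n) (hw : 0 ≤ w)
    (hwts : ∀ x ∈ (weight.take n.toNat).drop 1, 0 ≤ x) (hnl : n ≤ weight.length)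
    (hlen : dp.length = n.toNat)
    (hrows : ∀ k : Nat, k < n.toNat → (dp.getD k []).length = (w + 1).toNat)
    (hrow0 : ∀ t : Nat, t < (w + 1).toNat → (dp.getD 0 []).getD t 0 = gRec weight w 0 t) :
    ∀ m : Nat, 1 + (m : Int) ≤ n →
      ((PySem.List.pyRange 1 (1 + (m : Int)) 1).foldl
          (fun dp i => (PySem.List.pyRange 0 (w + 1) 1).foldl (innerStep weight i) dp) dp).length = n.toNat ∧
      (∀ k : Nat, k < n.toNat →
        (((PySem.List.pyRange 1 (1 + (m : Int)) 1).foldl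
            (fun dp i => (PySem.List.pyRange 0 (w + 1) 1).foldl (innerStep weight i) dp) dp).getD k []).length = (w + 1).toNat) ∧
      (∀ k : Nat, k < 1 + m → k < n.toNat → ∀ t : Nat, t < (w + 1).toNat →
        (((PySem.List.pyRange 1 (1 + (m : Int)) 1).foldl
            (fun dp i => (PySem.List.pyRange 0 (w + 1) 1).foldl (innerStep weight i) dp) dp).getD k []).getD t 0 = gRec weight w k t) := by
  intro m
  induction m with
  | zero =>
    intro _
    have h0 : PySem.List.pyRange 1 (1 + ((0 : Nat) : Int)) 1 = [] :=
      PySem.List.pyRange_one_eq_nil (by norm_num)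
    rw [h0]
    refine ⟨hlen, hrows, ?_⟩
    intro k hk _ t ht
    interval_cases k
    exact hrow0 t ht
  | succ m ih =>
    intro hm1
    have hm1' : 1 + (m : Int) ≤ n := by push_cast at hm1; omega
    obtain ⟨hL, hR, hG⟩ := ih hm1'
    have hsplit : PySem.List.pyRange 1 (1 + ((m + 1 : Nat) : Int)) 1
        = PySem.List.pyRange 1 (1 + (m : Int)) 1 ++ [1 + (m : Int)] := by
      rw [show (1 : Int) + ((m + 1 : Nat) : Int) = (1 + (m : Int)) + 1 by push_cast; ring]
      exact PySem.List.pyRange_one_succ_right (by omega)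
    rw [hsplit, List.foldl_append, List.foldl_cons, List.foldl_nil]
    set i : Int := 1 + (m : Int) with hidef
    set dpP := (PySem.List.pyRange 1 (1 + (m : Int)) 1).foldl
      (fun dp i => (PySem.List.pyRange 0 (w + 1) 1).foldl (innerStep weight i) dp) dp with hdpP
    have hiN : i.toNat = m + 1 := by omega
    have hin : i < n := by push_cast at hm1; omega
    have hwi : 0 ≤ PySem.List.pyGetD weight i 0 := wt_nonneg weight n i hwts hnl (by omega) hin
    have hprevP : ∀ t : Nat, t < (w + 1).toNat →
        (dpP.getD (i - 1).toNat []).getD t 0 = gRec weight w (i - 1).toNat t := by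
      intro t ht
      have : (i - 1).toNat = m := by omega
      rw [this]
      exact hG m (by omega) (by omega) t ht
    obtain ⟨hother, hlen2, hrowlen2, hfill⟩ :=
      inner_fold weight n w i dpP (by omega) hin hw hwi hL (hR i.toNat (by omega)) hprevP
        (w + 1).toNat (by omega)
    rw [show (((w + 1).toNat : Nat) : Int) = w + 1 from by omega] at hother hlen2 hrowlen2 hfill
    refine ⟨hlen2, ?_, ?_⟩
    · intro k hk
      by_cases hki : k = i.toNat
      · rw [hki]; exact hrowlen2
      · rw [hother k hki]; exact hR k hk
    · intro k hk hkn t ht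
      by_cases hki : k = i.toNat
      · rw [hki]; rw [hki] at *
        exact hfill t ht
      · rw [hother k hki]
        exact hG k (by omega) hkn t ht

lemma knapsack13_eq_gRec (weight : List Int) (n : Int) (w : Int)
    (h : Pre_knapsack13 weight n w) :
    knapsack13 weight n w =
      (if gRec weight w (n - 1).toNat w = 8388607 then -1
       else gRec weight w (n - 1).toNat w) := by
  obtain ⟨hn, hnl, hw, hwts, hneg⟩ := h
  simp only [knapsack13]
  set w0 := PySem.List.pyGetD weight 0 0 with hw0def
  set dp0 := (PySem.List.pyRange 0 n 1).map (fun _ => List.replicate (w + 1).toNat (8388607 : Int)) with hdp0def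
  have hdp0len : dp0.length = n.toNat := by
    rw [hdp0def, List.length_map, PySem.List.length_pyRange_one]; omega
  have hdp0 : ∀ k : Nat, k < n.toNat → dp0.getD k [] = List.replicate (w + 1).toNat 8388607 := by
    intro k hk
    have hkl : k < dp0.length := by omega
    rw [List.getD_eq_getElem?_getD, List.getElem?_eq_getElem hkl, Option.getD_some]
    simp only [hdp0def, List.getElem_map]
  have h0len : 0 < dp0.length := by omega
  set dp2 := (if w0 ≤ w then dpSet (dpSet dp0 0 0 0) 0 w0 1 else dpSet dp0 0 0 0) with hdp2def
  have hdp2eq : dp2 = dp0.set 0 (row0 weight w) := by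
    rw [hdp2def]
    have hA : dpSet dp0 0 0 0
        = dp0.set 0 (PySem.List.pySetD (List.replicate (w + 1).toNat (8388607 : Int)) 0 0) := by
      unfold dpSet
      rw [PySem.List.pySetD_of_nonneg (h := le_rfl), pyGetD_nonneg_eq _ _ le_rfl,
        Int.toNat_zero, hdp0 0 (by omega)]
    unfold row0
    rw [← hw0def]
    split_ifs with hc
    · rw [hA]
      unfold dpSet
      rw [PySem.List.pySetD_of_nonneg (h := le_rfl), pyGetD_nonneg_eq _ _ le_rfl, Int.toNat_zero,
        getD_set_self _ _ _ _ h0len, List.set_set]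
    · rw [hA]
  have hlen2 : dp2.length = n.toNat := by
    rw [hdp2eq, List.length_set]; exact hdp0len
  have hrows2 : ∀ k : Nat, k < n.toNat → (dp2.getD k []).length = (w + 1).toNat := by
    intro k hk
    rw [hdp2eq]
    by_cases hk0 : k = 0
    · subst hk0
      rw [getD_set_self _ _ _ _ h0len]
      exact length_row0 weight w
    · rw [getD_set_ne _ _ _ _ _ (fun hh => hk0 hh.symm), hdp0 k hk, List.length_replicate]
  have hrow0v : ∀ t : Nat, t < (w + 1).toNat → (dp2.getD 0 []).getD t 0 = gRec weight w 0 t := by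
    intro t ht
    rw [hdp2eq, getD_set_self _ _ _ _ h0len]
    show _ = (row0 weight w).getD ((t : Int)).toNat 0
    rw [show ((t : Int)).toNat = t from by omega]
  obtain ⟨hLf, hRf, hGf⟩ := outer_fold weight n w dp2 hn hw hwts hnl hlen2 hrows2 hrow0v
    (n - 1).toNat (by omega)
  rw [show (1 : Int) + (((n - 1).toNat : Nat) : Int) = n from by omega] at hLf hRf hGf
  have hfin : dpGet ((PySem.List.pyRange 1 n 1).foldl
      (fun dp i => (PySem.List.pyRange 0 (w + 1) 1).foldl (innerStep weight i) dp) dp2) (n - 1) w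
        = gRec weight w (n - 1).toNat w := by
    rw [dpGet_eq _ _ _ (by omega) hw]
    have hh := hGf (n - 1).toNat (by omega) (by omega) w.toNat (by omega)
    rwa [show ((w.toNat : Nat) : Int) = w from by omega] at hh
  rw [hfin]

-- ---- B side ----
-- every element of a pySetD result is an old element or the written value
lemma mem_pySetD {α : Type} (xs : List α) (i : Int) (v x : α)
    (h : x ∈ PySem.List.pySetD xs i v) : x ∈ xs ∨ x = v := by
  unfold PySem.List.pySetD PySem.List.pySet? at h
  cases hidx : PySem.List.pyIdx? xs.length i with
  | none => rw [hidx] at h; simp at h; exact Or.inl h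
  | some k =>
    rw [hidx] at h
    simp at h
    exact List.mem_or_eq_of_mem_set h

lemma mem_row0_le (weight : List Int) (w : Int) (x : Int) (hx : x ∈ row0 weight w) :
    x ≤ 8388607 := by
  unfold row0 at hx
  split_ifs at hx with hc
  · rcases mem_pySetD _ _ _ _ hx with hx1 | hx1
    · rcases mem_pySetD _ _ _ _ hx1 with hx2 | hx2
      · rw [List.eq_of_mem_replicate hx2]
      · omega
    · omega
  · rcases mem_pySetD _ _ _ _ hx with hx1 | hx1
    · rw [List.eq_of_mem_replicate hx1]
    · omega

lemma row0_getD_le (weight : List Int) (w : Int) (t : Nat) :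
    (row0 weight w).getD t 0 ≤ 8388607 := by
  by_cases ht : t < (row0 weight w).length
  · refine mem_row0_le weight w _ ?_
    rw [List.getD_eq_getElem?_getD, List.getElem?_eq_getElem ht, Option.getD_some]
    exact List.getElem_mem ht
  · rw [List.getD_eq_getElem?_getD, List.getElem?_eq_none (by omega), Option.getD_none]
    omega

lemma gRec_le (weight : List Int) (w : Int) : ∀ (i : Nat) (j : Int), gRec weight w i j ≤ 8388607 := by
  intro i
  induction i with
  | zero => intro j; exact row0_getD_le weight w j.toNat
  | succ i ih =>
    intro j
    simp only [gRec]
    split_ifs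
    · exact ih j
    · exact le_trans (min_le_left _ _) (ih j)

-- the dict after i passes: exactly the sums 0..w that A's row i marks reachable
def dchar (weight : List Int) (w : Int) (i : Nat) (d : PySem.Dict Int Int) : Prop :=
  d.keys.Nodup ∧ ∀ j : Int, d.get? j =
    if 0 ≤ j ∧ j ≤ w ∧ gRec weight w i j < 8388607 then some (gRec weight w i j) else none

-- B's seeding loop builds a dict holding the finite entries of row 0
lemma base_fold (weight : List Int) (w : Int) :
    ∀ c : Nat, (c : Int) ≤ w + 1 →
      ((PySem.List.pyRange 0 (c : Int) 1).foldl
          (fun d j => if PySem.List.pyGetD (row0 weight w) j 0 < 8388607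
            then d.insert j (PySem.List.pyGetD (row0 weight w) j 0) else d)
          PySem.Dict.empty).keys.Nodup ∧
      ∀ j : Int, ((PySem.List.pyRange 0 (c : Int) 1).foldl
          (fun d j => if PySem.List.pyGetD (row0 weight w) j 0 < 8388607
            then d.insert j (PySem.List.pyGetD (row0 weight w) j 0) else d)
          PySem.Dict.empty).get? j =
        if 0 ≤ j ∧ j < (c : Int) ∧ (row0 weight w).getD j.toNat 0 < 8388607
        then some ((row0 weight w).getD j.toNat 0) else none := by
  intro c
  induction c with
  | zero =>
    intro _
    rw [show ((0 : Nat) : Int) = (0 : Int) by norm_num, PySem.List.pyRange_one_eq_nil (by omega)]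
    rw [List.foldl_nil]
    refine ⟨PySem.Dict.nodup_keys_empty, ?_⟩
    intro j
    rw [PySem.Dict.get?_empty]
    rw [if_neg (by omega)]
  | succ c ih =>
    intro hc1
    obtain ⟨hnd, hget⟩ := ih (by push_cast at hc1 ⊢; omega)
    have hsplit : PySem.List.pyRange 0 ((c + 1 : Nat) : Int) 1
        = PySem.List.pyRange 0 (c : Int) 1 ++ [(c : Int)] := by
      push_cast
      exact PySem.List.pyRange_one_succ_right (by omega)
    rw [hsplit, List.foldl_append, List.foldl_cons, List.foldl_nil]
    rw [PySem.List.pyGetD_natCast]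
    have hcN : ((c : Int)).toNat = c := by omega
    by_cases hcond : (row0 weight w).getD c 0 < 8388607
    · rw [if_pos hcond]
      refine ⟨PySem.Dict.nodup_keys_insert _ _ _ hnd, ?_⟩
      intro j
      rw [PySem.Dict.get?_insert]
      by_cases hj : j = (c : Int)
      · subst hj
        rw [if_pos rfl, hcN, if_pos ⟨by omega, by push_cast; omega, hcond⟩]
      · rw [if_neg hj, hget j]
        by_cases h1 : 0 ≤ j ∧ j < (c : Int) ∧ (row0 weight w).getD j.toNat 0 < 8388607
        · rw [if_pos h1, if_pos ⟨h1.1, by push_cast; omega, h1.2.2⟩]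
        · rw [if_neg h1, if_neg ?_]
          intro h2
          exact h1 ⟨h2.1, by push_cast at h2 ⊢; omega, h2.2.2⟩
    · rw [if_neg hcond]
      refine ⟨hnd, ?_⟩
      intro j
      rw [hget j]
      by_cases h1 : 0 ≤ j ∧ j < (c : Int) ∧ (row0 weight w).getD j.toNat 0 < 8388607
      · rw [if_pos h1, if_pos ⟨h1.1, by push_cast; omega, h1.2.2⟩]
      · rw [if_neg h1, if_neg ?_]
        intro h2
        by_cases hj : j = (c : Int)
        · subst hj; rw [hcN] at h2; exact hcond h2.2.2
        · exact h1 ⟨h2.1, by push_cast at h2 ⊢; omega, h2.2.2⟩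

lemma dchar_base (weight : List Int) (w : Int) (hw : 0 ≤ w) :
    dchar weight w 0 ((PySem.List.pyRange 0 (w + 1) 1).foldl
      (fun d j => if PySem.List.pyGetD (row0 weight w) j 0 < 8388607
        then d.insert j (PySem.List.pyGetD (row0 weight w) j 0) else d)
      PySem.Dict.empty) := by
  have hb := base_fold weight w (w + 1).toNat (by omega)
  rw [show (((w + 1).toNat : Nat) : Int) = w + 1 from by omega] at hb
  obtain ⟨hnd, hget⟩ := hb
  refine ⟨hnd, ?_⟩
  intro j
  rw [hget j]
  have hg0 : gRec weight w 0 j = (row0 weight w).getD j.toNat 0 := rfl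
  split_ifs with h1 h2 h2
  · rw [hg0]
  · exfalso; rw [hg0] at h2; push_cast at h1; exact h2 ⟨h1.1, by omega, h1.2.2⟩
  · exfalso; rw [hg0] at h2; exact h1 ⟨h2.1, by omega, h2.2.2⟩
  · rfl

-- one pass over the snapshot items extends the dict from row i to row i+1
lemma inner_fold_B (weight : List Int) (w wi : Int) (hwi : 0 ≤ wi) (i' : Nat)
    (d : PySem.Dict Int Int) (hd : dchar weight w i' d) :
    ∀ (rest P : List (Int × Int)), d.items = P ++ rest →
    ∀ e : PySem.Dict Int Int, e.keys.Nodup →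
    (∀ j : Int, e.get? j =
      if (j - wi) ∈ P.map Prod.fst ∧ j ≤ w ∧ gRec weight w i' (j - wi) + 1 < gRec weight w i' j
      then some (gRec weight w i' (j - wi) + 1) else d.get? j) →
    (rest.foldl (passStep w wi) e).keys.Nodup ∧
    ∀ j : Int, (rest.foldl (passStep w wi) e).get? j =
      if (j - wi) ∈ (P ++ rest).map Prod.fst ∧ j ≤ w ∧ gRec weight w i' (j - wi) + 1 < gRec weight w i' j
      then some (gRec weight w i' (j - wi) + 1) else d.get? j := by
  intro rest
  induction rest with
  | nil =>
    intro P hitems e hend he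
    rw [List.foldl_nil, List.append_nil]
    exact ⟨hend, he⟩
  | cons sc rest ih =>
    intro P hitems e hend he
    obtain ⟨s, c⟩ := sc
    -- the snapshot entry (s, c) is a real entry of d
    have hmem : (s, c) ∈ d.items := by rw [hitems]; simp
    have hs : d.get? s = some c := PySem.Dict.get?_of_mem_items d hmem hd.1
    have hsprop : 0 ≤ s ∧ s ≤ w ∧ gRec weight w i' s < 8388607 ∧ c = gRec weight w i' s := by
      rw [hd.2 s] at hs
      by_cases h1 : 0 ≤ s ∧ s ≤ w ∧ gRec weight w i' s < 8388607
      · rw [if_pos h1] at hs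
        exact ⟨h1.1, h1.2.1, h1.2.2, (Option.some_injective _ hs).symm⟩
      · rw [if_neg h1] at hs; exact absurd hs (by simp)
    -- s is not among the processed keys
    have hsP : s ∉ P.map Prod.fst := by
      have hk : d.keys = P.map Prod.fst ++ (s :: rest.map Prod.fst) := by
        show d.items.map Prod.fst = _
        rw [hitems]; simp
      have := hd.1
      rw [hk] at this
      intro hmemP
      exact (List.disjoint_of_nodup_append this) hmemP (by simp)
    -- hence e still holds d's value at the target t = s + wi
    have het : e.get? (s + wi) = d.get? (s + wi) := by
      rw [he (s + wi)]
      rw [if_neg ?_]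
      intro hcontra
      rw [show s + wi - wi = s by ring] at hcontra
      exact hsP hcontra.1
    have hgetDe : PySem.Dict.getD e (s + wi) 8388607
        = if s + wi ≤ w then gRec weight w i' (s + wi) else 8388607 := by
      rw [PySem.Dict.getD_eq_get?_getD, het, hd.2 (s + wi)]
      by_cases h1 : s + wi ≤ w
      · rw [if_pos h1]
        by_cases h2 : gRec weight w i' (s + wi) < 8388607
        · rw [if_pos ⟨by omega, h1, h2⟩]; rfl
        · rw [if_neg (by tauto)]
          have := gRec_le weight w i' (s + wi)
          simp only [Option.getD_none]
          omega
      · rw [if_neg h1, if_neg (by tauto)]; rfl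
    rw [List.foldl_cons]
    have hstep : ∀ e' : PySem.Dict Int Int, e'.keys.Nodup →
        (∀ j : Int, e'.get? j =
          if (j - wi) ∈ (P ++ [(s, c)]).map Prod.fst ∧ j ≤ w ∧ gRec weight w i' (j - wi) + 1 < gRec weight w i' j
          then some (gRec weight w i' (j - wi) + 1) else d.get? j) →
        (rest.foldl (passStep w wi) e').keys.Nodup ∧
        ∀ j : Int, (rest.foldl (passStep w wi) e').get? j =
          if (j - wi) ∈ ((P ++ [(s, c)]) ++ rest).map Prod.fst ∧ j ≤ w ∧ gRec weight w i' (j - wi) + 1 < gRec weight w i' j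
          then some (gRec weight w i' (j - wi) + 1) else d.get? j :=
      ih (P ++ [(s, c)]) (by rw [hitems]; simp)
    have hP' : ∀ j : Int, (j - wi) ∈ (P ++ [(s, c)]).map Prod.fst ↔
        ((j - wi) ∈ P.map Prod.fst ∨ j = s + wi) := by
      intro j
      simp only [List.map_append, List.map_cons, List.map_nil, List.mem_append,
        List.mem_cons, List.not_mem_nil, or_false]
      constructor
      · rintro (h | h)
        · exact Or.inl h
        · exact Or.inr (by omega)
      · rintro (h | h)
        · exact Or.inl h
        · exact Or.inr (by omega)
    have hcase : (passStep w wi e (s, c)).keys.Nodup ∧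
        (∀ j : Int, (passStep w wi e (s, c)).get? j =
          if (j - wi) ∈ (P ++ [(s, c)]).map Prod.fst ∧ j ≤ w ∧ gRec weight w i' (j - wi) + 1 < gRec weight w i' j
          then some (gRec weight w i' (j - wi) + 1) else d.get? j) := by
      simp only [passStep]
      by_cases hcnd : s + wi ≤ w ∧ c + 1 < PySem.Dict.getD e (s + wi) 8388607
      · rw [if_pos hcnd]
        refine ⟨PySem.Dict.nodup_keys_insert _ _ _ hend, ?_⟩
        intro j
        rw [PySem.Dict.get?_insert]
        by_cases hj : j = s + wi
        · subst hj
          rw [if_pos rfl]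
          have hlt : gRec weight w i' s + 1 < gRec weight w i' (s + wi) := by
            have h2 := hcnd.2
            rw [hgetDe, if_pos hcnd.1] at h2
            omega
          rw [if_pos ⟨(hP' _).mpr (Or.inr rfl), hcnd.1,
            by rw [show s + wi - wi = s by ring]; exact hlt⟩]
          rw [show s + wi - wi = s by ring, hsprop.2.2.2]
        · rw [if_neg hj, he j]
          by_cases h1 : (j - wi) ∈ P.map Prod.fst ∧ j ≤ w ∧ gRec weight w i' (j - wi) + 1 < gRec weight w i' j
          · rw [if_pos h1, if_pos ⟨(hP' j).mpr (Or.inl h1.1), h1.2⟩]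
          · rw [if_neg h1, if_neg ?_]
            intro h2
            rcases (hP' j).mp h2.1 with hm | hm
            · exact h1 ⟨hm, h2.2⟩
            · exact hj hm
      · rw [if_neg hcnd]
        refine ⟨hend, ?_⟩
        intro j
        rw [he j]
        by_cases hj : j = s + wi
        · subst hj
          rw [if_neg (fun h => hsP (by rw [show s + wi - wi = s by ring] at h; exact h.1))]
          rw [if_neg ?_]
          intro h2
          apply hcnd
          refine ⟨h2.2.1, ?_⟩
          rw [hgetDe, if_pos h2.2.1, hsprop.2.2.2]
          have := h2.2.2
          rw [show s + wi - wi = s by ring] at this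
          omega
        · by_cases h1 : (j - wi) ∈ P.map Prod.fst ∧ j ≤ w ∧ gRec weight w i' (j - wi) + 1 < gRec weight w i' j
          · rw [if_pos h1, if_pos ⟨(hP' j).mpr (Or.inl h1.1), h1.2⟩]
          · rw [if_neg h1, if_neg ?_]
            intro h2
            rcases (hP' j).mp h2.1 with hm | hm
            · exact h1 ⟨hm, h2.2⟩
            · exact hj hm
    obtain ⟨hnd2, he2⟩ := hcase
    have hres := hstep _ hnd2 he2
    rw [show ((P ++ [(s, c)]) ++ rest) = P ++ (s, c) :: rest by simp] at hres
    exact hres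

-- after one full pass the dict characterizes row i+1
lemma dchar_pass (weight : List Int) (w wi : Int) (hwi : 0 ≤ wi) (i' : Nat)
    (hwieq : PySem.List.pyGetD weight ((i' : Int) + 1) 0 = wi)
    (d : PySem.Dict Int Int) (hd : dchar weight w i' d) :
    dchar weight w (i' + 1) ((PySem.Dict.items d).foldl (passStep w wi) d) := by
  obtain ⟨hnd, hres⟩ := inner_fold_B weight w wi hwi i' d hd d.items [] rfl d hd.1
    (by intro j; rw [if_neg (by simp)])
  rw [List.nil_append] at hres
  refine ⟨hnd, ?_⟩
  intro j
  rw [hres j]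
  have hmemiff : (j - wi) ∈ d.items.map Prod.fst ↔
      (0 ≤ j - wi ∧ j - wi ≤ w ∧ gRec weight w i' (j - wi) < 8388607) := by
    have h1 : (j - wi) ∈ d.items.map Prod.fst ↔ ¬ d.get? (j - wi) = none := by
      rw [PySem.Dict.get?_eq_none_iff_not_mem_keys]
      show _ ↔ ¬ (j - wi) ∉ d.items.map (fun x => x.1)
      simp
    rw [h1, hd.2 (j - wi)]
    by_cases h2 : 0 ≤ j - wi ∧ j - wi ≤ w ∧ gRec weight w i' (j - wi) < 8388607
    · rw [if_pos h2]; exact iff_of_true (by simp) h2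
    · rw [if_neg h2]; exact iff_of_false (by simp) h2
  have hgsucc : gRec weight w (i' + 1) j =
      if j - wi < 0 then gRec weight w i' j
      else min (gRec weight w i' j) (gRec weight w i' (j - wi) + 1) := by
    show (if j - PySem.List.pyGetD weight ((i' : Int) + 1) 0 < 0 then _ else _) = _
    rw [hwieq]
  by_cases hC : (j - wi) ∈ d.items.map Prod.fst ∧ j ≤ w ∧
      gRec weight w i' (j - wi) + 1 < gRec weight w i' j
  · rw [if_pos hC]
    obtain ⟨hm, hjw, hlt⟩ := hC
    obtain ⟨hs0, hsw, hsfin⟩ := hmemiff.mp hm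
    have hval : gRec weight w (i' + 1) j = gRec weight w i' (j - wi) + 1 := by
      rw [hgsucc, if_neg (by omega)]
      omega
    rw [if_pos ⟨by omega, hjw, by rw [hval]; have := gRec_le weight w i' j; omega⟩, hval]
  · rw [if_neg hC, hd.2 j]
    by_cases hjr : 0 ≤ j ∧ j ≤ w
    · have hval : gRec weight w (i' + 1) j = gRec weight w i' j := by
        rw [hgsucc]
        by_cases hs : j - wi < 0
        · rw [if_pos hs]
        · rw [if_neg hs]
          by_cases hsfin : gRec weight w i' (j - wi) < 8388607
          · have hm : (j - wi) ∈ d.items.map Prod.fst :=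
              hmemiff.mpr ⟨by omega, by omega, hsfin⟩
            have : ¬ gRec weight w i' (j - wi) + 1 < gRec weight w i' j := by
              intro hlt; exact hC ⟨hm, hjr.2, hlt⟩
            omega
          · have h1 := gRec_le weight w i' j
            omega
      rw [hval]
    · rw [if_neg (by tauto), if_neg (by tauto)]

-- B's outer fold keeps the dict characterizing row m
lemma outer_fold_B (weight : List Int) (n w : Int)
    (hwts : ∀ x ∈ (weight.take n.toNat).drop 1, 0 ≤ x) (hnl : n ≤ weight.length)
    (d0 : PySem.Dict Int Int) (hd0 : dchar weight w 0 d0) :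
    ∀ m : Nat, 1 + (m : Int) ≤ n →
      dchar weight w m ((PySem.List.pyRange 1 (1 + (m : Int)) 1).foldl (fun d i =>
        (PySem.Dict.items d).foldl (passStep w (PySem.List.pyGetD weight i 0)) d) d0) := by
  intro m
  induction m with
  | zero =>
    intro _
    have h0 : PySem.List.pyRange 1 (1 + ((0 : Nat) : Int)) 1 = [] :=
      PySem.List.pyRange_one_eq_nil (by norm_num)
    rw [h0, List.foldl_nil]
    exact hd0
  | succ m ih =>
    intro hm1
    have hm1' : 1 + (m : Int) ≤ n := by push_cast at hm1; omega
    have hprev := ih hm1'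
    have hsplit : PySem.List.pyRange 1 (1 + ((m + 1 : Nat) : Int)) 1
        = PySem.List.pyRange 1 (1 + (m : Int)) 1 ++ [1 + (m : Int)] := by
      rw [show (1 : Int) + ((m + 1 : Nat) : Int) = (1 + (m : Int)) + 1 by push_cast; ring]
      exact PySem.List.pyRange_one_succ_right (by omega)
    rw [hsplit, List.foldl_append, List.foldl_cons, List.foldl_nil]
    have hin : (1 + (m : Int)) < n := by push_cast at hm1; omega
    have hwi : 0 ≤ PySem.List.pyGetD weight (1 + (m : Int)) 0 :=
      wt_nonneg weight n (1 + (m : Int)) hwts hnl (by omega) hin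
    have hwieq : PySem.List.pyGetD weight ((m : Int) + 1) 0
        = PySem.List.pyGetD weight (1 + (m : Int)) 0 := by rw [add_comm]
    exact dchar_pass weight w (PySem.List.pyGetD weight (1 + (m : Int)) 0) hwi m hwieq _ hprev

lemma knapsack13_alt_eq_gRec (weight : List Int) (n : Int) (w : Int)
    (h : Pre_knapsack13 weight n w) :
    knapsack13_alt weight n w =
      (if gRec weight w (n - 1).toNat w = 8388607 then -1
       else gRec weight w (n - 1).toNat w) := by
  obtain ⟨hn, hnl, hw, hwts, _⟩ := h
  simp only [knapsack13_alt]
  have hrow : (if PySem.List.pyGetD weight 0 0 ≤ w then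
      PySem.List.pySetD (PySem.List.pySetD (List.replicate (w + 1).toNat (8388607 : Int)) 0 0)
        (PySem.List.pyGetD weight 0 0) 1
    else PySem.List.pySetD (List.replicate (w + 1).toNat (8388607 : Int)) 0 0) = row0 weight w := rfl
  rw [hrow]
  have hd0 := dchar_base weight w hw
  have hdF := outer_fold_B weight n w hwts hnl _ hd0 (n - 1).toNat (by omega)
  rw [show (1 : Int) + (((n - 1).toNat : Nat) : Int) = n from by omega] at hdF
  obtain ⟨_, hget⟩ := hdF
  rw [PySem.Dict.getD_eq_get?_getD, hget w]
  by_cases hfin : gRec weight w (n - 1).toNat w = 8388607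
  · rw [if_pos hfin, if_neg (by omega)]
    rfl
  · have := gRec_le weight w (n - 1).toNat w
    rw [if_pos ⟨hw, le_refl w, by omega⟩, if_neg hfin]
    rfl

-- ===== VERDICT (by name: the statement is the Claim_ definition above) =====
theorem knapsack13_spec : Claim_equal_knapsack13 := by
  intro weight n w _ hpre
  unfold Spec_knapsack13
  rw [knapsack13_eq_gRec weight n w hpre, knapsack13_alt_eq_gRec weight n w hpre]
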